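-- pv_equiv track=rewrite | github.com/YoItSoul/Souls-of-Avarice | soa_additions/tools/regen_block_stages.py | build_flat
-- ===== SOURCE A (Python) =====
-- def build_flat(items, tags, tag_items):
--     """Merge tag rules into items. Returns (merged_items, stats)."""
--     merged = dict(items)
--     unresolved = []
--     for tag_id, stages in tags.items():
--         members = tag_items.get(tag_id)
--         if not members:
--             unresolved.append(tag_id)
--             continue
--         for item_id in members:
--             existing = merged.get(item_id, [])
--             # union stages while preserving order and uniqueness
--             combined = list(existing)
--             for s in stages:
--                 if s not in combined:
--                     combined.append(s)
--             merged[item_id] = combined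
--     return merged, unresolved
-- ===== SOURCE B (Python) =====
-- def build_flat(items, tags, tag_items):
--     """Merge tag rules into items. Returns (merged_items, stats)."""
--     # Flatten the tag rules into a list of (item_id, stages) events and the
--     # unresolved tags, then rebuild the merged dict key by key from scratch.
--     unresolved = [t for t, _ in tags.items() if not tag_items.get(t)]
--     events = [(i, stages) for t, stages in tags.items()
--               for i in (tag_items.get(t) or [])]
--     touched = list(dict.fromkeys(i for i, _ in events))
--     keys = list(dict.fromkeys(list(items) + touched))
--     merged = {}
--     for k in keys:
--         combined = list(items.get(k, []))
--         for i, stages in events: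
--             if i == k:
--                 for s in stages:
--                     if s not in combined:
--                         combined.append(s)
--         merged[k] = combined
--     return merged, unresolved
-- ===== Notes on version B (the rewrite author's own statement) =====
-- stated objective: alternative
-- what changed: B replaces A's incremental dict-threading loop by a flatten-then-rebuild scheme: it first flattens the tag rules into an explicit (item_id, stages) event list plus the unresolved list via comprehensions, derives the final key order with dict.fromkeys, and then reconstructs the merged dict key by key, computing each value directly as the ordered-unique union of the item's original stages with all events for that key.
import Mathlib
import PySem

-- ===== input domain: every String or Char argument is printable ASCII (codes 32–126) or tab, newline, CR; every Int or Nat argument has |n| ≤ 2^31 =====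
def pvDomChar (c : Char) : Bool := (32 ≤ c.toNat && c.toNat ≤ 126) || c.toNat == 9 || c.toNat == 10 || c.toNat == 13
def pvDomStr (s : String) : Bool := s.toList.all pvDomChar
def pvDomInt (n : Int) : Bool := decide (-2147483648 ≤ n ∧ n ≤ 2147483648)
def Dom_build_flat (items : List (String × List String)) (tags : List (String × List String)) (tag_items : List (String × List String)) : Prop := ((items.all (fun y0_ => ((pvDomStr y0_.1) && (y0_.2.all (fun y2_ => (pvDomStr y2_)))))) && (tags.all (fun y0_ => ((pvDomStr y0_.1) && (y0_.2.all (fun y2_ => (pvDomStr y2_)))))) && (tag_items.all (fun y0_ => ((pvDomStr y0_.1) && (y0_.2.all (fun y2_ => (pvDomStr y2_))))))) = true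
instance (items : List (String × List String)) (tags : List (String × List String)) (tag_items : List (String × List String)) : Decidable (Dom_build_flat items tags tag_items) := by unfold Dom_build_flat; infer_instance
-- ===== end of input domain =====

-- B replaces A's incremental dict-threading loop by a flatten-then-rebuild scheme (event list +
-- per-key reconstruction); return values agree, though B copies untouched items' lists (Python
-- object identity, not value, differs there).

-- ===== PORT A =====
def build_flat (items : List (String × List String)) (tags : List (String × List String)) (tag_items : List (String × List String)) : (List (String × List String)) × List String :=
  let tagsD := PySem.Dict.ofList tags
  let tiD := PySem.Dict.ofList tag_items
  -- merged = dict(items); unresolved = []; for tag_id, stages in tags.items(): …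
  let st := tagsD.items.foldl
    (fun (st : PySem.Dict String (List String) × List String) p =>
      match tiD.get? p.1 with
      | none => (st.1, st.2 ++ [p.1])                      -- members falsy (missing): unresolved
      | some members =>
        if members = [] then (st.1, st.2 ++ [p.1])         -- members falsy (empty): unresolved
        else
          (members.foldl (fun m item_id =>
            let existing := m.getD item_id []
            let combined := p.2.foldl (fun c s => if s ∈ c then c else c ++ [s]) existing
            m.insert item_id combined) st.1,
           st.2))
    (PySem.Dict.ofList items, [])
  (st.1.items, st.2)

-- ===== PORT B =====
def build_flat_alt (items : List (String × List String)) (tags : List (String × List String)) (tag_items : List (String × List String)) : (List (String × List String)) × List String :=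
  let itemsD := PySem.Dict.ofList items
  let tiD := PySem.Dict.ofList tag_items
  let tagRows := (PySem.Dict.ofList tags).items
  -- unresolved = [t for t, _ in tags.items() if not tag_items.get(t)]
  let unresolved := (tagRows.filter (fun p => (tiD.getD p.1 []).isEmpty)).map (·.1)
  -- events = [(i, stages) for t, stages in tags.items() for i in (tag_items.get(t) or [])]
  let events := tagRows.flatMap (fun p => (tiD.getD p.1 []).map (fun i => (i, p.2)))
  -- touched = list(dict.fromkeys(i for i, _ in events))
  let touched := PySem.List.dedup (events.map (·.1))
  -- keys = list(dict.fromkeys(list(items) + touched))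
  let keys := PySem.List.dedup (itemsD.keys ++ touched)
  -- merged rebuilt key by key: ordered-unique union of items.get(k, []) with all events for k
  let merged := keys.map (fun k =>
    (k, events.foldl (fun c q =>
          if q.1 = k then q.2.foldl (fun c s => if s ∈ c then c else c ++ [s]) c else c)
        (itemsD.getD k [])))
  (merged, unresolved)

-- ===== PRECONDITION & SPEC =====
def Spec_build_flat (items : List (String × List String)) (tags : List (String × List String)) (tag_items : List (String × List String)) (out : (List (String × List String)) × List String) : Prop := out = build_flat_alt items tags tag_items
instance (items : List (String × List String)) (tags : List (String × List String)) (tag_items : List (String × List String)) (out : (List (String × List String)) × List String) : Decidable (Spec_build_flat items tags tag_items out) := by unfold Spec_build_flat; infer_instance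

-- ===== CLAIM (what is proved, stated in full; the proofs are below) =====
def Claim_equal_build_flat : Prop := ∀ (items : List (String × List String)) (tags : List (String × List String)) (tag_items : List (String × List String)), Dom_build_flat items tags tag_items → Spec_build_flat items tags tag_items (build_flat items tags tag_items)

-- ===== LEMMAS AND PROOFS =====

-- ordered-unique append of the stages ss onto c (the shared inner loop of both programs)
def pvDed (c ss : List String) : List String :=
  ss.foldl (fun c s => if s ∈ c then c else c ++ [s]) c

-- the member list a tag row contributes (empty when missing; an empty members list contributes nothing)
def pvMembers (tiD : PySem.Dict String (List String)) (p : String × List String) : List String :=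
  match tiD.get? p.1 with
  | none => []
  | some ms => ms

-- the (item_id, stages) events one tag row generates
def pvEv (tiD : PySem.Dict String (List String)) (p : String × List String) : List (String × List String) :=
  (pvMembers tiD p).map (fun id => (id, p.2))

-- A's per-event update of merged
def pvStep (m : PySem.Dict String (List String)) (q : String × List String) : PySem.Dict String (List String) :=
  m.insert q.1 (pvDed (m.getD q.1 []) q.2)

-- the shared unresolved accumulation
def pvUStep (tiD : PySem.Dict String (List String)) (u : List String) (p : String × List String) : List String :=
  match tiD.get? p.1 with
  | none => u ++ [p.1]
  | some ms => if ms = [] then u ++ [p.1] else u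

lemma pvDed_append (c a b : List String) : pvDed c (a ++ b) = pvDed (pvDed c a) b := by
  simp [pvDed, List.foldl_append]

lemma pvMembers_getD (tiD : PySem.Dict String (List String)) (p : String × List String) :
    pvMembers tiD p = tiD.getD p.1 [] := by
  cases h : tiD.get? p.1 <;> simp [pvMembers, PySem.Dict.getD, h]

lemma pvPairA (tiD : PySem.Dict String (List String)) (tl : List (String × List String))
    (m : PySem.Dict String (List String)) (u : List String) :
    tl.foldl
      (fun (st : PySem.Dict String (List String) × List String) p =>
        match tiD.get? p.1 with
        | none => (st.1, st.2 ++ [p.1])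
        | some members =>
          if members = [] then (st.1, st.2 ++ [p.1])
          else
            (members.foldl (fun m item_id =>
              m.insert item_id (p.2.foldl (fun c s => if s ∈ c then c else c ++ [s]) (m.getD item_id []))) st.1,
             st.2)) (m, u)
    = (tl.foldl (fun m p => (pvEv tiD p).foldl pvStep m) m, tl.foldl (pvUStep tiD) u) := by
  induction tl generalizing m u with
  | nil => rfl
  | cons p tl ih =>
    simp only [List.foldl_cons]
    cases h : tiD.get? p.1 with
    | none =>
      rw [ih]; simp [pvEv, pvMembers, pvUStep, h]
    | some ms =>
      by_cases hms : ms = [] <;>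
        simp only [hms, if_pos, ite_false] <;>
        rw [ih] <;>
        simp [pvEv, pvMembers, pvUStep, pvStep, pvDed, h, hms, List.foldl_map]

-- the unresolved fold is the filter-map comprehension B uses
lemma pvUnres (tiD : PySem.Dict String (List String)) (tl : List (String × List String)) (u : List String) :
    tl.foldl (pvUStep tiD) u = u ++ (tl.filter (fun p => (tiD.getD p.1 []).isEmpty)).map (·.1) := by
  induction tl generalizing u with
  | nil => simp
  | cons p tl ih =>
    simp only [List.foldl_cons, List.filter_cons]
    cases h : tiD.get? p.1 with
    | none => rw [ih]; simp [pvUStep, PySem.Dict.getD, h]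
    | some ms =>
      by_cases hms : ms = [] <;> rw [ih] <;>
        simp [pvUStep, PySem.Dict.getD, h, hms, List.isEmpty_iff]

-- value of A's fold at a key: ordered-unique union with all stages filed under that key
lemma pvFoldStep_getD (L : List (String × List String)) (m : PySem.Dict String (List String)) (k : String) :
    (L.foldl pvStep m).getD k [] = pvDed (m.getD k []) ((L.filter (fun q => q.1 == k)).flatMap (·.2)) := by
  induction L generalizing m with
  | nil => simp [pvDed]
  | cons q L ih =>
    simp only [List.foldl_cons, ih, List.filter_cons]
    by_cases h : q.1 = k
    · simp [pvStep, h, pvDed_append]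
    · simp [pvStep, PySem.Dict.getD_insert, h, Ne.symm h]

-- B's per-key fold over all events equals one pvDed over the events filed under that key
lemma pvValue (E : List (String × List String)) (c : List String) (k : String) :
    E.foldl (fun c q =>
        if q.1 = k then q.2.foldl (fun c s => if s ∈ c then c else c ++ [s]) c else c) c
    = pvDed c ((E.filter (fun q => q.1 == k)).flatMap (·.2)) := by
  induction E generalizing c with
  | nil => simp [pvDed]
  | cons q E ih =>
    simp only [List.foldl_cons, List.filter_cons]
    by_cases h : q.1 = k
    · simp [h, ih, pvDed]
    · simp [h, ih]

lemma pvSetUpdate_ofList (s : PySem.Set String) (xs : List String) :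
    PySem.Set.update s (PySem.Set.ofList xs) = PySem.Set.update s xs := by
  rw [PySem.Set.update_eq_append_filter, PySem.Set.update_eq_append_filter, PySem.Set.ofList_ofList]

-- ===== VERDICT (by name: the statement is the Claim_ definition above) =====
theorem build_flat_spec : Claim_equal_build_flat := by
  intro items tags tag_items _
  simp only [Spec_build_flat, build_flat, build_flat_alt]
  rw [pvPairA (PySem.Dict.ofList tag_items) (PySem.Dict.ofList tags).items (PySem.Dict.ofList items) []]
  set tiD := PySem.Dict.ofList tag_items with htiD
  set initD := PySem.Dict.ofList items with hinitD
  set rows := (PySem.Dict.ofList tags).items with hrows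
  have hev : (fun (p : String × List String) => (tiD.getD p.1 []).map (fun i => (i, p.2)))
      = pvEv tiD := by
    funext p; simp [pvEv, pvMembers_getD]
  rw [hev]
  set E := rows.flatMap (pvEv tiD) with hE
  have hfold : rows.foldl (fun m p => (pvEv tiD p).foldl pvStep m) initD = E.foldl pvStep initD := by
    rw [hE]; exact (List.foldl_flatMap (f := pvEv tiD) (g := pvStep) (l := rows) (init := initD)).symm
  have hstep : pvStep = fun (d : PySem.Dict String (List String)) (x : String × List String) =>
      d.insert x.1 (pvDed (d.getD x.1 []) x.2) := rfl
  have hnd : (E.foldl pvStep initD).keys.Nodup := by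
    rw [hstep]
    exact PySem.Dict.nodup_keys_foldl_insert_key E Prod.fst _ initD (PySem.Dict.nodup_keys_ofList items)
  have hAkeys : (E.foldl pvStep initD).keys = PySem.Set.update initD.keys (E.map (·.1)) := by
    rw [hstep]; exact PySem.Dict.keys_foldl_insert_key E Prod.fst _ initD
  have hBkeys : PySem.List.dedup (initD.keys ++ PySem.List.dedup (E.map (·.1)))
      = PySem.Set.update initD.keys (E.map (·.1)) := by
    simp only [PySem.List.dedup_eq_ofList, PySem.Set.ofList_append, pvSetUpdate_ofList]
    rw [PySem.Set.ofList_eq_self_of_nodup _ (PySem.Dict.nodup_keys_ofList items)]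
  rw [hfold, pvUnres]
  refine Prod.ext ?_ (by simp)
  show (E.foldl pvStep initD).items = _
  rw [PySem.Dict.items_eq_map_keys _ hnd ([] : List String), hAkeys, hBkeys.symm]
  refine List.map_congr_left (fun k _ => ?_)
  rw [hBkeys.symm, hAkeys.symm] at *
  rw [pvFoldStep_getD, pvValue]
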